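-- pv_equiv track=rewrite | github.com/merklejerk/whisper-scribe | py/src/transcriber.py | _suppress_repetition
-- ===== SOURCE A (Python) =====
-- def _suppress_repetition(text: str, max_repeats: int, drop_only: bool) -> str:
--     """Collapse excessive single-token repetitions.
--
--     If the entire segment is one word repeated over the allowed limit and
--     drop_only is True, return an empty string to suppress emission.
--     """
--     if max_repeats <= 0:
--         return text
--     parts = text.split()
--     if not parts:
--         return text
--     # Detect if entire segment is same token
--     unique_tokens = set(parts)
--     if len(unique_tokens) == 1 and len(parts) > max_repeats:
--         return "" if drop_only else unique_tokens.pop()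
--     out: list[str] = []
--     last = None
--     run = 0
--     for w in parts:
--         if w == last:
--             run += 1
--         else:
--             last = w
--             run = 1
--         if run <= max_repeats:
--             out.append(w)
--     return " ".join(out)
-- ===== SOURCE B (Python) =====
-- def _suppress_repetition(text: str, max_repeats: int, drop_only: bool) -> str:
--     if max_repeats <= 0:
--         return text
--     parts = text.split()
--     if not parts:
--         return text
--     # run-length encode the token stream
--     groups = []
--     cur, cnt = parts[0], 1
--     for w in parts[1:]:
--         if w == cur:
--             cnt += 1
--         else:
--             groups.append((cur, cnt))
--             cur, cnt = w, 1
--     groups.append((cur, cnt))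
--     if len(groups) == 1 and cnt > max_repeats:
--         return "" if drop_only else cur
--     return " ".join(t for t, c in groups for _ in range(min(c, max_repeats)))
-- ===== Notes on version B (the rewrite author's own statement) =====
-- stated objective: alternative
-- what changed: B first builds a run-length encoding (token,count groups) of the split tokens in one pass, decides the single-group suppression case from the final group count instead of building a set, and emits min(count,max_repeats) copies per group; A instead streams tokens with last/run state and a separate set-based whole-segment check.
import Mathlib
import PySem

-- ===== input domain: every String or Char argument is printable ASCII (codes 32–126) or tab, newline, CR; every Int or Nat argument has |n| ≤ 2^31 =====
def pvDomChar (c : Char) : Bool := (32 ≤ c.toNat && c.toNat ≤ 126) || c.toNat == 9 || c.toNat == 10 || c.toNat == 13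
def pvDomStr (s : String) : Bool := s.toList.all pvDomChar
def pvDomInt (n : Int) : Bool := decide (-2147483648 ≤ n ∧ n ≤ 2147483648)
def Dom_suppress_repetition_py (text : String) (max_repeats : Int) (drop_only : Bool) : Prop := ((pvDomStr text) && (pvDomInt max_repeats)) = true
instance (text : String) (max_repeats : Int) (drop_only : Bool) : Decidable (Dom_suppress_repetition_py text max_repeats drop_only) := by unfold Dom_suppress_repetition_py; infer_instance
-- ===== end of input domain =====

-- B replaces A's last/run streaming loop plus set-based whole-segment check by a run-length
-- encoding pass and per-group emission (objective: alternative decomposition, same cost).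

-- ===== PORT A =====
-- A's for-loop over parts with state (last, run, out); appends w when run <= max_repeats.
def pvALoop (m : Int) : List String → Option String → Int → List String → List String
  | [], _, _, out => out
  | w :: ws, last, run, out =>
    if some w == last then
      pvALoop m ws last (run + 1) (if run + 1 ≤ m then out ++ [w] else out)
    else
      pvALoop m ws (some w) 1 (if (1 : Int) ≤ m then out ++ [w] else out)

def suppress_repetition_py (text : String) (max_repeats : Int) (drop_only : Bool) : String :=
  if max_repeats ≤ 0 then text
  else
    let parts := PySem.Str.split₀ text
    if parts = [] then text
    else
      let uniq : PySem.Set String := PySem.Set.ofList parts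
      if uniq.length = 1 ∧ (parts.length : Int) > max_repeats then
        -- set.pop() on the singleton set reached here is its unique element (headD is exact there)
        (if drop_only then "" else uniq.headD "")
      else
        PySem.Str.join " " (pvALoop max_repeats parts none 0 [])

-- ===== PORT B =====
-- Source B's run-length-encoding loop: state (groups, cur, cnt); returns the final state.
def pvRleLoop : List String → List (String × Int) → String → Int →
    List (String × Int) × String × Int
  | [], gs, cur, cnt => (gs, cur, cnt)
  | w :: ws, gs, cur, cnt =>
    if w == cur then pvRleLoop ws gs cur (cnt + 1)
    else pvRleLoop ws (gs ++ [(cur, cnt)]) w 1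

def suppress_repetition_py_alt (text : String) (max_repeats : Int) (drop_only : Bool) : String :=
  if max_repeats ≤ 0 then text
  else
    match PySem.Str.split₀ text with
    | [] => text
    | p :: ps =>
      let s := pvRleLoop ps [] p 1
      let groups := s.1 ++ [(s.2.1, s.2.2)]
      if groups.length = 1 ∧ s.2.2 > max_repeats then
        (if drop_only then "" else s.2.1)
      else
        PySem.Str.join " "
          (groups.flatMap (fun g => List.replicate (min g.2 max_repeats).toNat g.1))

-- ===== PRECONDITION & SPEC =====
def Spec_suppress_repetition_py (text : String) (max_repeats : Int) (drop_only : Bool) (out : String) : Prop := out = suppress_repetition_py_alt text max_repeats drop_only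
instance (text : String) (max_repeats : Int) (drop_only : Bool) (out : String) : Decidable (Spec_suppress_repetition_py text max_repeats drop_only out) := by unfold Spec_suppress_repetition_py; infer_instance

-- ===== CLAIM (what is proved, stated in full; the proofs are below) =====
def Claim_equal_suppress_repetition_py : Prop := ∀ (text : String) (max_repeats : Int) (drop_only : Bool), Dom_suppress_repetition_py text max_repeats drop_only → Spec_suppress_repetition_py text max_repeats drop_only (suppress_repetition_py text max_repeats drop_only)

-- ===== LEMMAS AND PROOFS =====

-- the full group list produced by B starting from pending group (cur, cnt)
def pvGroups (ws : List String) (cur : String) (cnt : Int) : List (String × Int) :=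
  (pvRleLoop ws [] cur cnt).1 ++ [((pvRleLoop ws [] cur cnt).2.1, (pvRleLoop ws [] cur cnt).2.2)]

-- B's emission of a group list
def pvEmit (m : Int) (gs : List (String × Int)) : List String :=
  gs.flatMap (fun g => List.replicate (min g.2 m).toNat g.1)

theorem pvRleLoop_acc (ws : List String) (gs : List (String × Int)) (cur : String) (cnt : Int) :
    pvRleLoop ws gs cur cnt =
      (gs ++ (pvRleLoop ws [] cur cnt).1, (pvRleLoop ws [] cur cnt).2) := by
  induction ws generalizing gs cur cnt with
  | nil => simp [pvRleLoop]
  | cons w ws ih =>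
    simp only [pvRleLoop]
    by_cases h : (w == cur) = true
    · rw [if_pos h, if_pos h]
      exact ih gs cur (cnt + 1)
    · rw [if_neg h, if_neg h]
      rw [ih (gs ++ [(cur, cnt)]), ih ([] ++ [(cur, cnt)])]
      simp

theorem pvGroups_nil (cur : String) (cnt : Int) : pvGroups [] cur cnt = [(cur, cnt)] := by
  simp [pvGroups, pvRleLoop]

theorem pvGroups_cons (w : String) (ws : List String) (cur : String) (cnt : Int) :
    pvGroups (w :: ws) cur cnt =
      if w = cur then pvGroups ws cur (cnt + 1) else (cur, cnt) :: pvGroups ws w 1 := by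
  simp only [pvGroups, pvRleLoop]
  by_cases h : w = cur
  · simp [h]
  · simp only [beq_iff_eq, h, if_false]
    rw [pvRleLoop_acc ws ([] ++ [(cur, cnt)]) w 1]
    simp

-- structure of the group list: it starts with (cur, C) for some C ≥ cnt
theorem pvGroups_head (ws : List String) (cur : String) (cnt : Int) :
    ∃ C rest, pvGroups ws cur cnt = (cur, C) :: rest ∧ cnt ≤ C := by
  induction ws generalizing cur cnt with
  | nil => exact ⟨cnt, [], pvGroups_nil cur cnt, le_refl _⟩
  | cons w ws ih =>
    rw [pvGroups_cons]
    by_cases h : w = cur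
    · obtain ⟨C, rest, hg, hC⟩ := ih cur (cnt + 1)
      exact ⟨C, rest, by simp [h, hg], by omega⟩
    · exact ⟨cnt, pvGroups ws w 1, by simp [h], le_refl _⟩

-- list identity used to peel one emitted token off the head group
theorem pvPeel (w : String) (K K' : Nat) (acc E : List String) (h : K' = K + 1) :
    acc ++ [w] ++ (List.replicate K w ++ E) = acc ++ (List.replicate K' w ++ E) := by
  subst h
  simp [List.replicate_succ]

-- what A's loop still emits from state (some cur, cnt), expressed via B's groups
def pvTail (m : Int) (cur : String) (cnt : Int) (ws : List String) : List String :=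
  match pvGroups ws cur cnt with
  | g :: rest => List.replicate ((min g.2 m).toNat - (min cnt m).toNat) cur ++ pvEmit m rest
  | [] => []

theorem pvALoop_tail (m : Int) (hm : 1 ≤ m) (ws : List String) (cur : String) (cnt : Int)
    (hcnt : 1 ≤ cnt) (acc : List String) :
    pvALoop m ws (some cur) cnt acc = acc ++ pvTail m cur cnt ws := by
  induction ws generalizing cur cnt acc with
  | nil => simp [pvALoop, pvTail, pvGroups_nil, pvEmit]
  | cons w ws ih =>
    by_cases h : w = cur
    · subst h
      simp only [pvALoop, beq_self_eq_true, if_true]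
      rw [ih w (cnt + 1) (by omega)]
      obtain ⟨C, rest, hg, hC⟩ := pvGroups_head ws w (cnt + 1)
      simp only [pvTail, pvGroups_cons, if_true, hg]
      by_cases hle : cnt + 1 ≤ m
      · rw [if_pos hle]
        exact pvPeel w ((min C m).toNat - (min (cnt + 1) m).toNat)
          ((min C m).toNat - (min cnt m).toNat) acc _ (by omega)
      · rw [if_neg hle]
        rw [show (min C m).toNat - (min (cnt + 1) m).toNat
              = (min C m).toNat - (min cnt m).toNat from by omega]
    · have hne : (some w == some cur) = false := by simp [h]
      simp only [pvALoop, hne, Bool.false_eq_true, if_false, if_pos hm]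
      rw [ih w 1 (by omega)]
      obtain ⟨C, rest, hg, hC⟩ := pvGroups_head ws w 1
      simp only [pvTail, pvGroups_cons, h, if_false, hg, pvEmit, List.flatMap_cons, Nat.sub_self, List.replicate_zero, List.nil_append]
      exact pvPeel w ((min C m).toNat - (min (1 : Int) m).toNat) (min C m).toNat acc _ (by omega)

-- A's loop from the initial state equals B's per-group emission
theorem pvALoop_emit (m : Int) (hm : 1 ≤ m) (p : String) (ps : List String) :
    pvALoop m (p :: ps) none 0 [] = pvEmit m (pvGroups ps p 1) := by
  have hne : (some p == (none : Option String)) = false := by simp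
  have h1 : pvALoop m (p :: ps) none 0 [] = pvALoop m ps (some p) 1 [p] := by
    simp [pvALoop, hm]
  rw [h1, pvALoop_tail m hm ps p 1 (le_refl _) [p]]
  obtain ⟨C, rest, hg, hC⟩ := pvGroups_head ps p 1
  simp only [pvTail, hg, pvEmit, List.flatMap_cons]
  have := pvPeel p ((min C m).toNat - (min (1 : Int) m).toNat) (min C m).toNat []
    (List.flatMap (fun g => List.replicate (min g.2 m).toNat g.1) rest) (by omega)
  simpa using this

-- all-equal tokens: B's loop never closes a group
theorem pvRleLoop_const (ws : List String) (cur : String) (cnt : Int)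
    (h : ∀ w ∈ ws, w = cur) :
    pvRleLoop ws [] cur cnt = ([], cur, cnt + ws.length) := by
  induction ws generalizing cnt with
  | nil => simp [pvRleLoop]
  | cons w ws ih =>
    have hw : w = cur := h w (by simp)
    simp only [pvRleLoop, hw, beq_self_eq_true, if_true]
    rw [ih (cnt + 1) (fun x hx => h x (by simp [hx]))]
    simp only [List.length_cons]
    push_cast
    rw [show cnt + 1 + (ws.length : Int) = cnt + ((ws.length : Int) + 1) from by ring]

-- B's single-group condition characterised
theorem pvRleLoop_fst_nil (ws : List String) :
    ∀ cur : String, ∀ cnt : Int, (pvRleLoop ws [] cur cnt).1 = [] → ∀ w ∈ ws, w = cur := by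
  induction ws with
  | nil => intro cur cnt _ w hw; simp at hw
  | cons w ws ih =>
    intro cur cnt h
    simp only [pvRleLoop] at h
    by_cases hw : (w == cur) = true
    · rw [if_pos hw] at h
      have hall := ih cur (cnt + 1) h
      intro x hx
      rcases List.mem_cons.mp hx with hx | hx
      · rw [hx]; exact beq_iff_eq.mp hw
      · exact hall x hx
    · rw [if_neg hw, pvRleLoop_acc ws ([] ++ [(cur, cnt)]) w 1] at h
      simp at h

theorem pvGroups_len_one (ps : List String) (p : String) :
    (pvRleLoop ps [] p 1).1 = [] ↔ ∀ w ∈ ps, w = p := by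
  constructor
  · exact pvRleLoop_fst_nil ps p 1
  · intro h
    rw [pvRleLoop_const ps p 1 h]

-- A's singleton-set condition characterised
theorem pvOfList_const (ps : List String) (p : String) (h : ∀ w ∈ ps, w = p) :
    PySem.Set.ofList (p :: ps) = [p] := by
  have haux : ∀ ws : List String, (∀ w ∈ ws, w = p) →
      ws.foldl PySem.Set.add [p] = [p] := by
    intro ws
    induction ws with
    | nil => intro _; rfl
    | cons w ws ih =>
      intro hall
      have hw : w = p := hall w (by simp)
      have hadd : PySem.Set.add [p] w = [p] := by
        subst hw; simp [PySem.Set.add]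
      simp only [List.foldl_cons, hadd]
      exact ih (fun x hx => hall x (by simp [hx]))
  rw [PySem.Set.ofList_eq_foldl]
  simp only [List.foldl_cons]
  have h0 : PySem.Set.add [] p = [p] := rfl
  rw [h0]
  exact haux ps h

theorem pvSet_len_one (ps : List String) (p : String) :
    (PySem.Set.ofList (p :: ps)).length = 1 ↔ ∀ w ∈ ps, w = p := by
  constructor
  · intro h
    have hmem : p ∈ PySem.Set.ofList (p :: ps) := by
      rw [PySem.Set.mem_ofList]; simp
    obtain ⟨t, ht⟩ := List.length_eq_one_iff.mp h
    intro w hw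
    have hwmem : w ∈ PySem.Set.ofList (p :: ps) := by
      rw [PySem.Set.mem_ofList]; simp [hw]
    rw [ht] at hmem hwmem
    simp at hmem hwmem
    rw [hwmem, hmem]
  · intro h
    rw [pvOfList_const ps p h]
    rfl

-- ===== VERDICT (by name: the statement is the Claim_ definition above) =====
theorem suppress_repetition_py_spec : Claim_equal_suppress_repetition_py := by
  unfold Claim_equal_suppress_repetition_py Spec_suppress_repetition_py
  intro text m drop _
  unfold suppress_repetition_py suppress_repetition_py_alt
  by_cases hm : m ≤ 0
  · simp [hm]
  · simp only [if_neg hm]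
    have hm1 : 1 ≤ m := by omega
    cases hps : PySem.Str.split₀ text with
    | nil => simp
    | cons p ps =>
      rw [if_neg (by simp)]
      by_cases hall : ∀ w ∈ ps, w = p
      · have hrle := pvRleLoop_const ps p 1 hall
        have hset1 : (PySem.Set.ofList (p :: ps)).length = 1 := (pvSet_len_one ps p).mpr hall
        by_cases hlen : ((p :: ps).length : Int) > m
        · rw [if_pos ⟨hset1, hlen⟩]
          simp only [hrle]
          rw [if_pos (show ([] ++ [(p, 1 + (ps.length : Int))] : List (String × Int)).length = 1
              ∧ 1 + (ps.length : Int) > m from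
            ⟨by simp, by simp only [List.length_cons] at hlen; push_cast at hlen ⊢; omega⟩)]
          cases drop with
          | true => simp
          | false => simp [pvOfList_const ps p hall]
        · rw [if_neg (fun hc => hlen hc.2)]
          simp only [hrle]
          rw [if_neg (by
            intro hc
            have h2 := hc.2
            exact hlen (by simp only [List.length_cons]; push_cast at h2 ⊢; omega))]
          rw [pvALoop_emit m hm1 p ps]
          simp [pvEmit, pvGroups, hrle]
      · rw [if_neg (fun hc => hall ((pvSet_len_one ps p).mp hc.1))]
        dsimp only
        rw [if_neg (fun hc => hall ((pvGroups_len_one ps p).mp (by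
          have h1 := hc.1
          simp only [List.length_append, List.length_singleton] at h1
          exact List.length_eq_zero_iff.mp (by omega))))]
        rw [pvALoop_emit m hm1 p ps]
        simp [pvEmit, pvGroups]
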